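-- pv_equiv track=rewrite | github.com/waynebhayes/BLANT | seed_mining/seeding_algorithm_core.py | estimate_total_pairs_to_process
-- ===== SOURCE A (Python) =====
-- def estimate_total_pairs_to_process(s1_index, s2_index):
--     total_graphlet_pairs = 0
--
--     for graphlet_id, s1_gid_entries in s1_index.items():
--         if graphlet_id in s2_index:
--             s2_gid_entries = s2_index[graphlet_id]
--
--             if len(s1_gid_entries) == 1 and len(s2_gid_entries) == 1:
--                 total_graphlet_pairs += len(s1_gid_entries) * len(s2_gid_entries)
--
--     return total_graphlet_pairs
-- ===== SOURCE B (Python) =====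
-- def estimate_total_pairs_to_process(s1_index, s2_index):
--     s1_keys = {gid for gid, entries in s1_index.items() if len(entries) == 1}
--     s2_keys = {gid for gid, entries in s2_index.items() if len(entries) == 1}
--     return len(s1_keys & s2_keys)
-- ===== Notes on version B (the rewrite author's own statement) =====
-- stated objective: simpler
-- what changed: A makes one interleaved pass over s1 with a dict lookup into s2 and length checks per key; B instead filters each index independently into a set of singleton-entry graphlet ids and returns the size of the two sets' intersection.
import Mathlib
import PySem

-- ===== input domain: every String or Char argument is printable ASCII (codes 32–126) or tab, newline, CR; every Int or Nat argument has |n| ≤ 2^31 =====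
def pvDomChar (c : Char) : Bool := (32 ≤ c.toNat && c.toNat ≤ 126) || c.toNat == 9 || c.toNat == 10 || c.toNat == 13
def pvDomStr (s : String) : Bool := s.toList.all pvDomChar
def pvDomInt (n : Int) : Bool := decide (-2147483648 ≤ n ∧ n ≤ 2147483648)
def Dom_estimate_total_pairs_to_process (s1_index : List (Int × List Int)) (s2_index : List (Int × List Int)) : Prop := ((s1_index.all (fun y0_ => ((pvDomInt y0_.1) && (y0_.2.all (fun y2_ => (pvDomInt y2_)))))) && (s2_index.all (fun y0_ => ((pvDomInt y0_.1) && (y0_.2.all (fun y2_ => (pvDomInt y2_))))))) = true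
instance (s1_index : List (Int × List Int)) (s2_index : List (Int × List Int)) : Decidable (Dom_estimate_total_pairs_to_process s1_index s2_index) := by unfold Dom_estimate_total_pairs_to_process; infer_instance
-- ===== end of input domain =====

-- ===== PORT A =====
-- B replaces A's single interleaved pass (per-key dict lookup into s2) by two independent
-- singleton-key filters and a set intersection; objective: a simpler decomposition, same cost.
def estimate_total_pairs_to_process (s1_index : List (Int × List Int)) (s2_index : List (Int × List Int)) : Int :=
  s1_index.foldl (fun total_graphlet_pairs p =>
    match (PySem.Dict.mk s2_index).get? p.1 with
    | some s2_gid_entries =>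
        if p.2.length = 1 ∧ s2_gid_entries.length = 1 then
          total_graphlet_pairs + (p.2.length : Int) * (s2_gid_entries.length : Int)
        else total_graphlet_pairs
    | none => total_graphlet_pairs) 0

-- ===== PORT B =====
-- {gid for gid, entries in idx.items() if len(entries) == 1}
def pvSingletonKeys (idx : List (Int × List Int)) : PySem.Set Int :=
  PySem.Set.ofList ((idx.filter (fun p => p.2.length == 1)).map (fun p => p.1))

def estimate_total_pairs_to_process_alt (s1_index : List (Int × List Int)) (s2_index : List (Int × List Int)) : Int :=
  PySem.Set.len (PySem.Set.inter (pvSingletonKeys s1_index) (pvSingletonKeys s2_index))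

-- ===== PRECONDITION & SPEC =====
-- Pre_ excludes association lists with duplicate graphlet ids: the parameters are Python
-- dicts, whose keys are always unique, so a duplicate-keyed list represents no dict input
-- (the two ports diverge only on such non-dict lists).
def Pre_estimate_total_pairs_to_process (s1_index : List (Int × List Int)) (s2_index : List (Int × List Int)) : Prop :=
  (s1_index.map (fun p => p.1)).Nodup ∧ (s2_index.map (fun p => p.1)).Nodup
instance (s1_index : List (Int × List Int)) (s2_index : List (Int × List Int)) : Decidable (Pre_estimate_total_pairs_to_process s1_index s2_index) := by unfold Pre_estimate_total_pairs_to_process; infer_instance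

def pvWitness_estimate_total_pairs_to_process : (List (Int × List Int)) × (List (Int × List Int)) :=
  ([(1, [5]), (2, [6, 7])], [(1, [9]), (3, [])])

def Spec_estimate_total_pairs_to_process (s1_index : List (Int × List Int)) (s2_index : List (Int × List Int)) (out : Int) : Prop := out = estimate_total_pairs_to_process_alt s1_index s2_index
instance (s1_index : List (Int × List Int)) (s2_index : List (Int × List Int)) (out : Int) : Decidable (Spec_estimate_total_pairs_to_process s1_index s2_index out) := by unfold Spec_estimate_total_pairs_to_process; infer_instance

-- ===== CLAIM (what is proved, stated in full; the proofs are below) =====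
def Claim_equal_estimate_total_pairs_to_process : Prop := ∀ (s1_index : List (Int × List Int)) (s2_index : List (Int × List Int)), Dom_estimate_total_pairs_to_process s1_index s2_index → Pre_estimate_total_pairs_to_process s1_index s2_index → Spec_estimate_total_pairs_to_process s1_index s2_index (estimate_total_pairs_to_process s1_index s2_index)

-- ===== LEMMAS AND PROOFS =====

-- the Boolean condition under which A's loop body counts the pair p of s1
def pvCondA (s2_index : List (Int × List Int)) (p : Int × List Int) : Bool :=
  match (PySem.Dict.mk s2_index).get? p.1 with
  | some s2_gid_entries => p.2.length == 1 && s2_gid_entries.length == 1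
  | none => false

-- one step of A's loop adds 1 exactly when pvCondA holds
lemma pvStep (s2_index : List (Int × List Int)) (acc : Int) (p : Int × List Int) :
    (match (PySem.Dict.mk s2_index).get? p.1 with
     | some s2_gid_entries =>
         if p.2.length = 1 ∧ s2_gid_entries.length = 1 then
           acc + (p.2.length : Int) * (s2_gid_entries.length : Int)
         else acc
     | none => acc)
    = acc + (if pvCondA s2_index p then 1 else 0) := by
  unfold pvCondA
  set o := (PySem.Dict.mk s2_index).get? p.1 with ho
  clear_value o
  cases o with
  | none => simp
  | some e2 =>
    by_cases h : p.2.length = 1 ∧ e2.length = 1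
    · simp only [h.1, h.2]
      simp
    · have hb : (p.2.length == 1 && e2.length == 1) = false := by
        rcases Decidable.not_and_iff_not_or_not.mp h with h1 | h1 <;> simp [h1]
      simp [if_neg h, hb]

-- A's loop adds exactly 1 for each counted entry: its result is a countP
lemma pvA_loop (s2_index s1_index : List (Int × List Int)) (acc : Int) :
    s1_index.foldl (fun total_graphlet_pairs p =>
      match (PySem.Dict.mk s2_index).get? p.1 with
      | some s2_gid_entries =>
          if p.2.length = 1 ∧ s2_gid_entries.length = 1 then
            total_graphlet_pairs + (p.2.length : Int) * (s2_gid_entries.length : Int)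
          else total_graphlet_pairs
      | none => total_graphlet_pairs) acc
    = acc + (s1_index.countP (pvCondA s2_index) : Int) := by
  induction s1_index generalizing acc with
  | nil => simp
  | cons p rest ih =>
    rw [List.foldl_cons, ih, List.countP_cons, pvStep]
    cases pvCondA s2_index p <;> simp <;> try omega

-- A's per-entry test ↔ singleton entry in s1 whose id is a singleton-entry key of s2
lemma pvCondA_iff (s2_index : List (Int × List Int))
    (h : (s2_index.map (fun p => p.1)).Nodup) (p : Int × List Int) :
    pvCondA s2_index p = true ↔
      (p.2.length == 1 &&
        ((s2_index.filter (fun q => q.2.length == 1)).map (fun q => q.1)).contains p.1) = true := by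
  induction s2_index with
  | nil => simp [pvCondA, PySem.Dict.get?]
  | cons q rest ih =>
    obtain ⟨k, v⟩ := q
    simp only [List.map_cons, List.nodup_cons] at h
    unfold pvCondA at ih ⊢
    rw [PySem.Dict.get?_mk_cons]
    by_cases hk : k = p.1
    · subst hk
      have hnotin2 : p.1 ∉ (rest.filter (fun r => r.2.length == 1)).map (fun r => r.1) := by
        intro hm
        rcases List.mem_map.mp hm with ⟨r, hr, hrr⟩
        exact h.1 (List.mem_map.mpr ⟨r, (List.mem_filter.mp hr).1, hrr⟩)
      by_cases hv : v.length = 1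
      · simp [hv]
      · simp [hv, hnotin2]
    · have hkb : (k == p.1) = false := by simp [hk]
      have hkb2 : (p.1 == k) = false := by simp [Ne.symm hk]
      have hcont :
          (((((k, v) :: rest).filter (fun q => q.2.length == 1)).map (fun q => q.1)).contains p.1)
            = ((rest.filter (fun q => q.2.length == 1)).map (fun q => q.1)).contains p.1 := by
        by_cases hv : v.length = 1 <;> simp [hv, hkb2]
      rw [hcont, hkb]
      simp only [Bool.false_eq_true, if_false]
      exact ih h.2

-- B's result is the same countP over s1
lemma pvB_eq_countP (s1_index s2_index : List (Int × List Int))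
    (h1 : (s1_index.map (fun p => p.1)).Nodup) :
    estimate_total_pairs_to_process_alt s1_index s2_index
      = (s1_index.countP (fun p =>
          p.2.length == 1 &&
          (pvSingletonKeys s2_index).contains p.1) : Int) := by
  have hnd : ((s1_index.filter (fun p => p.2.length == 1)).map (fun p => p.1)).Nodup :=
    h1.sublist (List.Sublist.map _ List.filter_sublist)
  unfold estimate_total_pairs_to_process_alt
  conv_lhs => rw [pvSingletonKeys, PySem.Set.ofList_eq_self_of_nodup _ hnd]
  unfold PySem.Set.inter PySem.Set.len
  rw [← List.countP_eq_length_filter, List.countP_map, List.countP_filter]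
  apply congrArg
  apply List.countP_congr
  intro a _
  constructor <;> (intro hx; simp only [Function.comp, Bool.and_eq_true] at hx ⊢; tauto)

-- ===== VERDICT (by name: the statement is the Claim_ definition above) =====
theorem estimate_total_pairs_to_process_spec : Claim_equal_estimate_total_pairs_to_process := by
  intro s1 s2 _ hpre
  unfold Spec_estimate_total_pairs_to_process
  unfold estimate_total_pairs_to_process
  rw [pvA_loop, pvB_eq_countP s1 s2 hpre.1, zero_add]
  apply congrArg
  apply List.countP_congr
  intro p _
  rw [pvCondA_iff s2 hpre.2 p]
  simp only [Bool.and_eq_true, and_congr_right_iff]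
  intro _
  rw [pvSingletonKeys, PySem.Set.contains_eq_listContains]
  simp only [List.contains_iff_mem, PySem.Set.mem_ofList]
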